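-- pv_equiv track=rewrite | github.com/DueUtil/DueUtil | util_due.py | clearmentions
-- ===== SOURCE A (Python) =====
-- def clearmentions(message):
--     mainStr = message;
--     cleanStr ="";
--     Start = False;
--     for x in range (0,len(mainStr)):
--         if mainStr[x] == '<' and mainStr[:x+2].endswith('@'):
--             Start = True;
--         elif mainStr[x] == '>' and Start:
--             Start = False;
--         elif not Start:
--             cleanStr = cleanStr + mainStr[x];
--     return cleanStr;
-- ===== SOURCE B (Python) =====
-- def clearmentions(message):
--     out = []
--     i = 0
--     n = len(message)
--     while i < n:
--         if message[i] == '<' and i + 1 < n and message[i + 1] == '@':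
--             # consume the whole mention span "<@...>" (or to end of string)
--             i += 2
--             while i < n and message[i] != '>':
--                 i += 1
--             i += 1  # step past the '>' (or past the end, which stops the loop)
--         else:
--             out.append(message[i])
--             i += 1
--     return ''.join(out)
-- ===== Notes on version B (the rewrite author's own statement) =====
-- stated objective: alternative
-- what changed: A scans every index with a Start boolean flag, re-testing a growing prefix slice with endswith at each position and extending the output by string concatenation; B is a flag-free index scan that, on an opening angle bracket followed by an at-sign, consumes the whole mention span with an inner skip loop through the closing bracket, building the result in a list joined once.
import Mathlib
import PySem

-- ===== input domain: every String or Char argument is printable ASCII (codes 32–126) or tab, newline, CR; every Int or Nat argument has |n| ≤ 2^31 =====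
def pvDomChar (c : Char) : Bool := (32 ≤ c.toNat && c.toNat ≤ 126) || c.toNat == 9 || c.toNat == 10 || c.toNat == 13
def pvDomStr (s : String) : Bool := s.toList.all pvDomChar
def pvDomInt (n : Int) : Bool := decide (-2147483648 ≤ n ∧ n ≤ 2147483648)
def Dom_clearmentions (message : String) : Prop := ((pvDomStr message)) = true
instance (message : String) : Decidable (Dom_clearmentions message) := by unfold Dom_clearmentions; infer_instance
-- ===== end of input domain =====

-- B replaces A's per-character flag machine (a Start flag plus a prefix-slice endswith test each
-- step) by an index scan that consumes each mention span with one inner skip loop (alternative).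

-- ===== PORT A =====
-- A's loop body: state (cleanStr, Start), index x into mainStr.
def pvAbody (mainStr : List Char) (st : List Char × Bool) (x : Int) : List Char × Bool :=
  if PySem.List.pyGetD mainStr x ' ' = '<' ∧
      PySem.Chars.endswith (PySem.List.slice mainStr none (some (x + 2))) ['@'] = true then
    (st.1, true)
  else if PySem.List.pyGetD mainStr x ' ' = '>' ∧ st.2 = true then
    (st.1, false)
  else if ¬ st.2 = true then
    (st.1 ++ [PySem.List.pyGetD mainStr x ' '], st.2)
  else st

def clearmentions (message : String) : String :=
  String.ofList (((PySem.List.pyRange 0 (PySem.Str.len message) 1).foldl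
    (pvAbody message.toList) ([], false)).1)

-- ===== PORT B =====
-- the outer while loop of Source B over the remaining characters
mutual
def pvGoB : List Char → List Char
  | [] => []
  | c :: r =>
    if c = '<' ∧ r.head? = some '@' then pvSkipB r.tail   -- i += 2, then skip the span
    else c :: pvGoB r
  termination_by l => l.length
  decreasing_by all_goals (simp [List.length_tail]; try omega)
-- the inner while loop: advance to the first '>' and step past it
def pvSkipB : List Char → List Char
  | [] => []
  | c :: r => if c = '>' then pvGoB r else pvSkipB r
  termination_by l => l.length
  decreasing_by all_goals (simp; try omega)
end

def clearmentions_alt (message : String) : String := String.ofList (pvGoB message.toList)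

-- ===== PRECONDITION & SPEC =====
def Spec_clearmentions (message : String) (out : String) : Prop := out = clearmentions_alt message
instance (message : String) (out : String) : Decidable (Spec_clearmentions message out) := by unfold Spec_clearmentions; infer_instance

-- ===== CLAIM (what is proved, stated in full; the proofs are below) =====
def Claim_equal_clearmentions : Prop := ∀ (message : String), Dom_clearmentions message → Spec_clearmentions message (clearmentions message)

-- ===== LEMMAS AND PROOFS =====

-- A's flag machine restated structurally on the suffix still to be scanned
def pvMachA : List Char → List Char → Bool → List Char
  | [], acc, _ => acc
  | c :: r, acc, start =>
    if c = '<' ∧ r.head? = some '@' then pvMachA r acc true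
    else if c = '>' ∧ start = true then pvMachA r acc false
    else if ¬ start = true then pvMachA r (acc ++ [c]) start
    else pvMachA r acc start

theorem pv_endswith_singleton (l : List Char) (a b : Char) :
    PySem.Chars.endswith (l ++ [a]) [b] = (a == b) := by
  show [b].isSuffixOf (l ++ [a]) = (a == b)
  rw [List.isSuffixOf]; simp [List.isPrefixOf, BEq.comm]

theorem pv_getD_mid (pre r : List Char) (c d : Char) :
    (pre ++ c :: r).getD pre.length d = c := by
  simp [List.getD]

theorem pv_slice_endswith (pre r : List Char) (c : Char) :
    PySem.Chars.endswith
        (PySem.List.slice (pre ++ c :: r) none (some ((pre.length : Int) + 2))) ['@']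
      = (r.headD c == '@') := by
  rw [PySem.List.slice_to (pre ++ c :: r) (by positivity)]
  have h2 : ((pre.length : Int) + 2).toNat = pre.length + 2 := by omega
  rw [h2]
  cases r with
  | nil =>
      rw [List.take_of_length_le (by simp)]
      simpa using pv_endswith_singleton pre c '@'
  | cons a t =>
      have : (pre ++ c :: a :: t).take (pre.length + 2) = (pre ++ [c]) ++ [a] := by
        simp [List.take_append, List.take_succ_cons]
      rw [this, pv_endswith_singleton]
      simp [List.headD]

theorem pv_cond_iff (c : Char) (r : List Char) :
    (c = '<' ∧ (r.headD c == '@') = true) ↔ (c = '<' ∧ r.head? = some '@') := by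
  cases r with
  | nil =>
      constructor
      · rintro ⟨hc, h⟩; subst hc; simp at h
      · rintro ⟨_, h⟩; simp at h
  | cons a t => simp [List.headD]

-- the index fold of A's port equals the structural machine on the remaining suffix
theorem pv_fold_eq_mach (suf : List Char) : ∀ (pre acc : List Char) (start : Bool),
    ((PySem.List.pyRange (pre.length : Int) (((pre ++ suf).length : Int)) 1).foldl
        (pvAbody (pre ++ suf)) (acc, start)).1 = pvMachA suf acc start := by
  induction suf with
  | nil =>
      intro pre acc start
      rw [PySem.List.pyRange_one_eq_nil (by simp)]
      rfl
  | cons c r ih =>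
      intro pre acc start
      rw [PySem.List.pyRange_one_cons (by simp; try omega)]
      rw [List.foldl_cons]
      have hget : PySem.List.pyGetD (pre ++ c :: r) (pre.length : Int) ' ' = c := by
        rw [PySem.List.pyGetD_natCast]; exact pv_getD_mid pre r c ' '
      have hbody : pvAbody (pre ++ c :: r) (acc, start) (pre.length : Int) =
          (if c = '<' ∧ r.head? = some '@' then (acc, true)
           else if c = '>' ∧ start = true then (acc, false)
           else if ¬ start = true then (acc ++ [c], start)
           else (acc, start)) := by
        unfold pvAbody
        rw [hget, pv_slice_endswith pre r c]
        rw [if_congr (pv_cond_iff c r) rfl rfl]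
      rw [hbody]
      have harr : (pre.length : Int) + 1 = ((pre ++ [c]).length : Int) := by simp
      have hlist : pre ++ c :: r = (pre ++ [c]) ++ r := by simp
      rw [harr, hlist]
      unfold pvMachA
      split_ifs with h1 h2 h3 <;>
        first
          | exact ih (pre ++ [c]) acc true
          | exact ih (pre ++ [c]) acc false
          | exact ih (pre ++ [c]) (acc ++ [c]) start
          | exact ih (pre ++ [c]) acc start

-- A's machine equals B's two mutually recursive loops (flag false ↔ outer loop, flag true ↔ skip loop)
theorem pv_mach_eq_go (n : Nat) : ∀ (l : List Char), l.length ≤ n → ∀ (acc : List Char),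
    pvMachA l acc false = acc ++ pvGoB l ∧ pvMachA l acc true = acc ++ pvSkipB l := by
  induction n with
  | zero =>
      intro l hl acc
      have h : l = [] := List.eq_nil_of_length_eq_zero (by omega)
      subst h
      simp [pvMachA, pvGoB, pvSkipB]
  | succ n ih =>
      intro l hl acc
      cases l with
      | nil => simp [pvMachA, pvGoB, pvSkipB]
      | cons c r =>
        have hr : r.length ≤ n := by simp at hl; omega
        constructor
        · show pvMachA (c :: r) acc false = acc ++ pvGoB (c :: r)
          rw [pvMachA, pvGoB]
          by_cases h1 : c = '<' ∧ r.head? = some '@'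
          · rw [if_pos h1, if_pos h1]
            obtain ⟨a, t, rfl⟩ : ∃ a t, r = a :: t := by
              cases r with
              | nil => simp at h1
              | cons a t => exact ⟨a, t, rfl⟩
            have ha : a = '@' := by simpa using h1.2
            have := (ih (a :: t) hr acc).2
            rw [this, pvSkipB, if_neg (by rw [ha]; decide)]
            rfl
          · rw [if_neg h1, if_neg h1]
            have h2 : ¬ (c = '>' ∧ false = true) := by simp
            rw [if_neg h2, if_pos (by simp)]
            have := (ih r hr (acc ++ [c])).1
            rw [this]; simp
        · show pvMachA (c :: r) acc true = acc ++ pvSkipB (c :: r)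
          rw [pvMachA, pvSkipB]
          by_cases h1 : c = '<' ∧ r.head? = some '@'
          · have hc : ¬ c = '>' := by rw [h1.1]; decide
            rw [if_pos h1, if_neg hc]
            exact (ih r hr acc).2
          · rw [if_neg h1]
            by_cases h2 : c = '>'
            · rw [if_pos (by exact ⟨h2, rfl⟩), if_pos h2]
              exact (ih r hr acc).1
            · rw [if_neg (by simp [h2]), if_neg (by simp), if_neg h2]
              exact (ih r hr acc).2

-- ===== VERDICT (by name: the statement is the Claim_ definition above) =====
theorem clearmentions_spec : Claim_equal_clearmentions := by
  intro message _
  unfold Spec_clearmentions clearmentions clearmentions_alt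
  have h := pv_fold_eq_mach message.toList [] [] false
  simp only [List.nil_append, List.length_nil, Nat.cast_zero] at h
  rw [PySem.Str.len_eq, h]
  rw [(pv_mach_eq_go message.toList.length message.toList le_rfl []).1]
  simp
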